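-- pv_equiv track=rewrite | github.com/MahjongRepository/mahjong | mahjong/hand_calculating/hand.py | _find_win_groups
-- ===== SOURCE A (Python) =====
-- def _find_win_groups(win_tile, hand, opened_melds):
--     win_tile_34 = (win_tile or 0) // 4
--     _opened_melds = opened_melds[:]
--
--     # to detect win groups
--     # we had to use only closed sets
--     closed_set_items = []
--     for x in hand:
--         if x not in _opened_melds:
--             closed_set_items.append(x)
--         else:
--             _opened_melds.remove(x)
--
--     # for forms like 45666 and ron on 6
--     # we can assume that ron was on 456 form and on 66 form
--     # and depends on form we will have different hand cost
--     # so, we had to check all possible win groups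
--     win_groups = [x for x in closed_set_items if win_tile_34 in x]
--     unique_win_groups = [list(x) for x in set(tuple(x) for x in win_groups)]
--
--     return unique_win_groups
-- ===== SOURCE B (Python) =====
-- def _find_win_groups(win_tile, hand, opened_melds):
--     win_tile_34 = (win_tile or 0) // 4
--     # The hand group at position i is a closed occurrence exactly when the opened
--     # melds cannot account for all occurrences of that group up to and including i.
--     winning = {tuple(g) for i, g in enumerate(hand)
--                if win_tile_34 in g and hand[:i + 1].count(g) > opened_melds.count(g)}
--     return [list(t) for t in winning]
-- ===== Notes on version B (the rewrite author's own statement) =====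
-- stated objective: alternative
-- what changed: A's stateful simulation (copy opened_melds, consume entries with list.remove while building a closed-set list, then a separate filter pass and a set-dedup) is replaced by a stateless per-position characterization: one set comprehension that keeps hand[i] iff it contains the winning tile and its occurrences in hand[:i+1] outnumber its occurrences in opened_melds.
import Mathlib
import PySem

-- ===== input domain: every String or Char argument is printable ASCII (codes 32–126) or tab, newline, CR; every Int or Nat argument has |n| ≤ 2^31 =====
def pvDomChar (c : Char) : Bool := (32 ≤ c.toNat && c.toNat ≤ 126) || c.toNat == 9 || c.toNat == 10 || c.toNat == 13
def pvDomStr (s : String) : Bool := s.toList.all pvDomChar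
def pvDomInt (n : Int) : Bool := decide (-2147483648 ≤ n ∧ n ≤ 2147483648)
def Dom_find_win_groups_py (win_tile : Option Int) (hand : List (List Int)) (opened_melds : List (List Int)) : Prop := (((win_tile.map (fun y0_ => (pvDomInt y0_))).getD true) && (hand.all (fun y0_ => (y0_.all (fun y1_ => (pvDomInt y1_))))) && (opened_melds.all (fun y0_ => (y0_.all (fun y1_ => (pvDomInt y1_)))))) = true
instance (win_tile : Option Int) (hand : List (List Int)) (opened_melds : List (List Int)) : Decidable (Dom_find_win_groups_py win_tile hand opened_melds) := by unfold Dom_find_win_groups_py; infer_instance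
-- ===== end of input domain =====

-- B replaces A's stateful consumable-multiset bookkeeping (copy opened_melds, list.remove per
-- consumed group, then a filter pass and a set-dedup) by a stateless per-position test: a hand
-- group at position i is a closed occurrence iff its occurrences in hand[:i+1] outnumber its
-- occurrences in opened_melds (objective: alternative). Both programs end by iterating a Python set.

-- ===== PORT A =====
def find_win_groups_py (win_tile : Option Int) (hand : List (List Int)) (opened_melds : List (List Int)) : List (List Int) :=
  let win_tile_34 := PySem.Int.floordiv (win_tile.getD 0) 4
  -- for x in hand: if x not in _opened_melds: closed_set_items.append(x) else _opened_melds.remove(x)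
  let st := hand.foldl
    (fun (st : List (List Int) × List (List Int)) x =>
      if x ∉ st.2 then (st.1 ++ [x], st.2)
      else (st.1, (PySem.List.remove? st.2 x).getD st.2))
    (([] : List (List Int)), opened_melds)
  let win_groups := st.1.filter (fun x => decide (win_tile_34 ∈ x))
  -- set(tuple(x) for x in win_groups), then [list(x) for x in …] (tuple↔list is identity here)
  PySem.Set.ofList win_groups

-- ===== PORT B =====
def find_win_groups_py_alt (win_tile : Option Int) (hand : List (List Int)) (opened_melds : List (List Int)) : List (List Int) :=
  let win_tile_34 := PySem.Int.floordiv (win_tile.getD 0) 4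
  -- {tuple(g) for i, g in enumerate(hand) if win_tile_34 in g and hand[:i+1].count(g) > opened_melds.count(g)}
  PySem.Set.ofList
    (((PySem.List.enumerate hand 0).filter (fun p =>
        decide (win_tile_34 ∈ p.2) &&
        decide (opened_melds.count p.2 < (PySem.List.slice hand none (some (p.1 + 1))).count p.2))).map (·.2))

-- ===== PRECONDITION & SPEC =====
def Spec_find_win_groups_py (win_tile : Option Int) (hand : List (List Int)) (opened_melds : List (List Int)) (out : List (List Int)) : Prop := out = find_win_groups_py_alt win_tile hand opened_melds
instance (win_tile : Option Int) (hand : List (List Int)) (opened_melds : List (List Int)) (out : List (List Int)) : Decidable (Spec_find_win_groups_py win_tile hand opened_melds out) := by unfold Spec_find_win_groups_py; infer_instance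

-- ===== CLAIM (what is proved, stated in full; the proofs are below) =====
def Claim_equal_find_win_groups_py : Prop := ∀ (win_tile : Option Int) (hand : List (List Int)) (opened_melds : List (List Int)), Dom_find_win_groups_py win_tile hand opened_melds → Spec_find_win_groups_py win_tile hand opened_melds (find_win_groups_py win_tile hand opened_melds)

-- ===== LEMMAS AND PROOFS =====

-- The closed-set items of A's first loop, as a structural recursion over the hand.
def pvClosedRec : List (List Int) → List (List Int) → List (List Int)
  | [], _ => []
  | x :: hs, om => if x ∈ om then pvClosedRec hs (om.erase x) else x :: pvClosedRec hs om

-- The same, driven by a remaining-count function instead of the opened-meld list.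
def pvCl : List (List Int) → (List Int → Nat) → List (List Int)
  | [], _ => []
  | x :: hs, c =>
      if c x = 0 then x :: pvCl hs c
      else pvCl hs (fun g => if g = x then c g - 1 else c g)

theorem pvA_loop (hand : List (List Int)) : ∀ (acc om : List (List Int)),
    (hand.foldl
      (fun (st : List (List Int) × List (List Int)) x =>
        if x ∉ st.2 then (st.1 ++ [x], st.2)
        else (st.1, (PySem.List.remove? st.2 x).getD st.2))
      (acc, om)).1 = acc ++ pvClosedRec hand om := by
  induction hand with
  | nil => intro acc om; simp [pvClosedRec]
  | cons x hs ih =>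
    intro acc om
    by_cases hx : x ∈ om
    · simp only [List.foldl_cons, pvClosedRec, hx, if_pos, not_true_eq_false, if_false,
        PySem.List.remove?_eq_some_erase om x hx, Option.getD_some]
      exact ih acc (om.erase x)
    · simp only [List.foldl_cons, pvClosedRec, hx, not_false_eq_true, if_true, if_false]
      rw [ih (acc ++ [x]) om]
      simp

theorem pvCl_count (hand : List (List Int)) : ∀ (om : List (List Int)),
    pvCl hand om.count = pvClosedRec hand om := by
  induction hand with
  | nil => intro om; rfl
  | cons x hs ih =>
    intro om
    by_cases hx : x ∈ om
    · have h0 : om.count x ≠ 0 := by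
        have := List.count_pos_iff.mpr hx; omega
      simp only [pvCl, pvClosedRec, hx, if_pos, h0, if_false]
      rw [← ih (om.erase x)]
      congr 1
      funext g
      by_cases hg : g = x
      · subst hg; rw [List.count_erase_self]; simp
      · rw [List.count_erase_of_ne hg]; simp [hg]
    · have h0 : om.count x = 0 := List.count_eq_zero.mpr hx
      simp only [pvCl, pvClosedRec, hx, if_false, h0, if_pos]
      rw [ih om]

theorem pvB_main (w : Int) (c0 : List Int → Nat) : ∀ (cur pre : List (List Int)),
    ((PySem.List.enumerate cur (pre.length : Int)).filter (fun p =>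
        decide (w ∈ p.2) &&
        decide (c0 p.2 < (PySem.List.slice (pre ++ cur) none (some (p.1 + 1))).count p.2))).map (·.2)
    = (pvCl cur (fun g => c0 g - pre.count g)).filter (fun x => decide (w ∈ x)) := by
  intro cur
  induction cur with
  | nil => intro pre; simp [pvCl, PySem.List.enumerate]
  | cons x hs ih =>
    intro pre
    have hcast : ((pre.length : Int) + 1) = ((pre.length + 1 : Nat) : Int) := by push_cast; ring
    have hpref : PySem.List.slice (pre ++ x :: hs) none (some ((pre.length : Int) + 1))
        = pre ++ [x] := by
      rw [hcast, PySem.List.slice_to_natCast, List.take_append]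
      simp
    have htail : ∀ (p : Int × List Int), p ∈ PySem.List.enumerate hs ((pre.length : Int) + 1) →
        (decide (w ∈ p.2) &&
          decide (c0 p.2 < (PySem.List.slice (pre ++ x :: hs) none (some (p.1 + 1))).count p.2))
        = (decide (w ∈ p.2) &&
          decide (c0 p.2 < (PySem.List.slice ((pre ++ [x]) ++ hs) none (some (p.1 + 1))).count p.2)) := by
      intro p _
      rw [show pre ++ x :: hs = (pre ++ [x]) ++ hs by simp]
    have h2 := ih (pre ++ [x])
    simp only [List.length_append, List.length_cons, List.length_nil, Nat.zero_add] at h2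
    have htailEq : ((PySem.List.enumerate hs ((pre.length : Int) + 1)).filter (fun p =>
          decide (w ∈ p.2) &&
          decide (c0 p.2 < (PySem.List.slice (pre ++ x :: hs) none (some (p.1 + 1))).count p.2))).map (·.2)
        = (pvCl hs (fun g => c0 g - (pre ++ [x]).count g)).filter (fun x => decide (w ∈ x)) := by
      rw [List.filter_congr htail, hcast, h2]
    have hfun : ∀ gg : List Int,
        c0 gg - (pre ++ [x]).count gg
          = if gg = x then c0 gg - pre.count gg - 1 else c0 gg - pre.count gg := by
      intro gg
      rw [List.count_append]
      by_cases hg : gg = x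
      · subst hg; simp; omega
      · have h0 : List.count gg [x] = 0 := by
          simp [show x ≠ gg from fun h => hg h.symm]
        rw [h0, if_neg hg]; omega
    rw [PySem.List.enumerate_cons, List.filter_cons]
    by_cases hwin : w ∈ x
    · by_cases hcnt : c0 x - pre.count x = 0
      · -- closed occurrence, winning: kept by both
        have hc : c0 x < (pre ++ [x]).count x := by
          rw [List.count_append]; simp; omega
        simp only [hpref, hwin, hc, decide_true, Bool.and_self, if_pos]
        simp only [pvCl, hcnt, if_pos, List.filter_cons, hwin, decide_true, if_pos]
        rw [List.map_cons]
        congr 1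
        rw [htailEq]
        refine congrArg _ (congrArg (pvCl hs) (funext fun gg => ?_))
        rw [hfun gg]
        by_cases hg : gg = x
        · subst hg; rw [if_pos rfl]; omega
        · rw [if_neg hg]
      · -- consumed occurrence: dropped by both
        have hc : ¬ c0 x < (pre ++ [x]).count x := by
          rw [List.count_append]; simp; omega
        simp only [hpref, hc, decide_false, Bool.and_false, if_neg, Bool.false_eq_true,
          not_false_eq_true]
        simp only [pvCl, hcnt, if_neg, not_false_eq_true]
        rw [htailEq]
        refine congrArg _ (congrArg (pvCl hs) (funext fun gg => hfun gg))
    · -- not a winning group: dropped by B's filter; dropped by A's win filter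
      simp only [hwin, decide_false, Bool.false_and, if_neg, Bool.false_eq_true, not_false_eq_true]
      rw [htailEq]
      by_cases hcnt : c0 x - pre.count x = 0
      · simp only [pvCl, hcnt, if_pos, List.filter_cons, hwin, decide_false, if_neg,
          Bool.false_eq_true, not_false_eq_true]
        refine congrArg _ (congrArg (pvCl hs) (funext fun gg => ?_))
        rw [hfun gg]
        by_cases hg : gg = x
        · subst hg; rw [if_pos rfl]; omega
        · rw [if_neg hg]
      · simp only [pvCl, hcnt, if_neg, not_false_eq_true]
        refine congrArg _ (congrArg (pvCl hs) (funext fun gg => hfun gg))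

-- ===== VERDICT (by name: the statement is the Claim_ definition above) =====
theorem find_win_groups_py_spec : Claim_equal_find_win_groups_py := by
  intro win_tile hand opened_melds _
  unfold Spec_find_win_groups_py
  simp only [find_win_groups_py, find_win_groups_py_alt]
  rw [pvA_loop hand [] opened_melds]
  have h := pvB_main (PySem.Int.floordiv (win_tile.getD 0) 4) (opened_melds.count ·) hand []
  simp only [List.length_nil, Nat.cast_zero, List.nil_append, List.count_nil, Nat.sub_zero] at h
  rw [List.nil_append, ← pvCl_count hand opened_melds, ← h]
  rfl
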